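-- pv_equiv track=rewrite | github.com/yeling/leetcode | leetcode2178.py | maximumEvenSplit2
-- ===== SOURCE A (Python) =====
-- from typing import List
--
-- def maximumEvenSplit2(finalSum: int) -> List[int]:
--     ans = []
--     if finalSum%2 == 1:
--         return ans
--     curr = 2
--     while finalSum > 0:
--         ans.append(curr)
--         finalSum -= curr
--         curr += 2
--     if finalSum < 0:
--         ans[-1] += finalSum
--     if len(ans) >= 2 and ans[-1] <= ans[-2]:
--         ans[-2] += ans[-1]
--         ans.pop()
--     return ans
-- ===== SOURCE B (Python) =====
-- def maximumEvenSplit2(finalSum: int):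
--     # B: binary-search the number of terms k (largest k with k*(k+1) <= finalSum),
--     # then build the answer directly; returns [] for non-positive or odd input.
--     if finalSum % 2 == 1 or finalSum <= 0:
--         return []
--     lo, hi = 1, finalSum
--     while lo < hi:
--         mid = (lo + hi + 1) // 2
--         if mid * (mid + 1) <= finalSum:
--             lo = mid
--         else:
--             hi = mid - 1
--     k = lo
--     return [2 * i for i in range(1, k)] + [2 * k + finalSum - k * (k + 1)]
-- ===== Notes on version B (the rewrite author's own statement) =====
-- stated objective: alternative
-- what changed: A builds the list incrementally by an overshoot-and-merge loop (append 2,4,6,... past the target, patch the last element, then merge the last two); B binary-searches the number of terms k (largest k with k*(k+1) <= finalSum) and constructs the answer directly as [2,4,...,2(k-1)] plus a final element absorbing the remainder.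
import Mathlib
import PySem

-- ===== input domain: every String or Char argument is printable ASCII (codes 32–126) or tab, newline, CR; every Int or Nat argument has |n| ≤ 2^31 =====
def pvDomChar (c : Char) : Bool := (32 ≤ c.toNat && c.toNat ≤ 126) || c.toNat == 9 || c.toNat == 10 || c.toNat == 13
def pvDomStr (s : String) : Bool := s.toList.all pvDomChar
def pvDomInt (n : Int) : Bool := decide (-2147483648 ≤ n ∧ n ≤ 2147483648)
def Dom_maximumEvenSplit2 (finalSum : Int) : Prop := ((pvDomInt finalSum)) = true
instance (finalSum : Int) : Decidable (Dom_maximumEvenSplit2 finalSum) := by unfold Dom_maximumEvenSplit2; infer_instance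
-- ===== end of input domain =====

-- B replaces A's overshoot-and-merge loop by a binary search for the number of
-- terms plus a direct list construction (alternative decomposition, no speed claim).

-- ===== PORT A =====
-- the while loop: appends curr, decrements finalSum, steps curr by 2
-- (the '0 < curr' conjunct is a totality guard only; A always starts at curr = 2)
def loopA (ans : List Int) (finalSum curr : Int) : List Int × Int :=
  if _h : 0 < finalSum ∧ 0 < curr then
    loopA (ans ++ [curr]) (finalSum - curr) (curr + 2)
  else (ans, finalSum)
termination_by finalSum.toNat
decreasing_by omega

def maximumEvenSplit2 (finalSum : Int) : List Int :=
  if PySem.Int.mod finalSum 2 = 1 then []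
  else
    let p := loopA [] finalSum 2
    let ans1 := if p.2 < 0 then p.1.dropLast ++ [p.1.getLast! + p.2] else p.1
    if 2 ≤ ans1.length ∧ ans1.getLast! ≤ ans1.dropLast.getLast! then
      ans1.dropLast.dropLast ++ [ans1.dropLast.getLast! + ans1.getLast!]
    else ans1

-- ===== PORT B =====
-- binary search: largest k in [lo, hi] with k*(k+1) ≤ finalSum
def bsearchK (finalSum lo hi : Int) : Int :=
  if _h : lo < hi then
    let mid := PySem.Int.floordiv (lo + hi + 1) 2
    if mid * (mid + 1) ≤ finalSum then bsearchK finalSum mid hi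
    else bsearchK finalSum lo (mid - 1)
  else lo
termination_by (hi - lo).toNat
decreasing_by
  all_goals
    have hb := PySem.Int.floordiv_two_mid_bounds (lo := lo + 1) (hi := hi) (by omega)
    have he : lo + 1 + hi = lo + hi + 1 := by ring
    rw [he] at hb
    omega

def maximumEvenSplit2_alt (finalSum : Int) : List Int :=
  if PySem.Int.mod finalSum 2 = 1 ∨ finalSum ≤ 0 then []
  else
    let k := bsearchK finalSum 1 finalSum
    ((PySem.List.pyRange 1 k 1).map (fun i => 2 * i)) ++ [2 * k + finalSum - k * (k + 1)]

-- ===== PRECONDITION & SPEC =====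
-- Pre_ excludes exactly the negative even inputs, on which A raises IndexError (ans[-1] on the empty list).
def Pre_maximumEvenSplit2 (finalSum : Int) : Prop :=
  PySem.Int.mod finalSum 2 = 1 ∨ 0 ≤ finalSum
instance (finalSum : Int) : Decidable (Pre_maximumEvenSplit2 finalSum) := by
  unfold Pre_maximumEvenSplit2; infer_instance
def pvWitness_maximumEvenSplit2 : Int := 12

def Spec_maximumEvenSplit2 (finalSum : Int) (out : List Int) : Prop := out = maximumEvenSplit2_alt finalSum
instance (finalSum : Int) (out : List Int) : Decidable (Spec_maximumEvenSplit2 finalSum out) := by unfold Spec_maximumEvenSplit2; infer_instance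

-- ===== CLAIM (what is proved, stated in full; the proofs are below) =====
def Claim_equal_maximumEvenSplit2 : Prop := ∀ (finalSum : Int), Dom_maximumEvenSplit2 finalSum → Pre_maximumEvenSplit2 finalSum → Spec_maximumEvenSplit2 finalSum (maximumEvenSplit2 finalSum)

-- ===== LEMMAS AND PROOFS =====

lemma getLast!_concat_int (l : List Int) (x : Int) : (l ++ [x]).getLast! = x := by
  simp [List.getLast!_eq_getLast?_getD]

lemma map_pyRange_shift (t a : Int) (f : Int → Int) :
    (PySem.List.pyRange a (a + t) 1).map f =
      (PySem.List.pyRange 0 t 1).map (fun i => f (a + i)) := by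
  rw [PySem.List.pyRange_one, PySem.List.pyRange_one]
  have h1 : (a + t - a).toNat = t.toNat := by omega
  have h2 : (t - 0).toNat = t.toNat := by omega
  rw [h1, h2]
  simp only [List.map_map]
  apply List.map_congr_left
  intro k _
  simp

-- characterization of A's loop: it appends curr, curr+2, …, t terms in all,
-- where t is the least count whose running sum reaches finalSum
lemma loopA_char (n : Nat) (fs curr : Int) (ans : List Int)
    (hn : fs.toNat ≤ n) (hc : 2 ≤ curr) (hf : 0 < fs) :
    ∃ t : Int, 1 ≤ t ∧
      loopA ans fs curr =
        (ans ++ (PySem.List.pyRange 0 t 1).map (fun i => curr + 2 * i),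
         fs - (t * curr + t * (t - 1))) ∧
      (t - 1) * curr + (t - 1) * (t - 2) < fs ∧ fs ≤ t * curr + t * (t - 1) := by
  induction n generalizing fs curr ans with
  | zero => omega
  | succ n ih =>
    rw [loopA, dif_pos ⟨hf, by omega⟩]
    by_cases hstop : fs - curr ≤ 0
    · rw [loopA, dif_neg (by omega)]
      refine ⟨1, le_refl _, ?_, by nlinarith, by nlinarith⟩
      have h1 : PySem.List.pyRange 0 1 1 = [0] := by
        rw [PySem.List.pyRange_one]; norm_num
      rw [h1]
      norm_num
    · obtain ⟨u, hu1, heq, hlow, hup⟩ :=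
        ih (fs - curr) (curr + 2) (ans ++ [curr]) (by omega) (by omega) (by omega)
      refine ⟨u + 1, by omega, ?_, ?_, ?_⟩
      · rw [heq]
        have hcons : PySem.List.pyRange 0 (u + 1) 1 = 0 :: PySem.List.pyRange 1 (u + 1) 1 :=
          PySem.List.pyRange_one_cons (by omega)
        have hsh : (PySem.List.pyRange 1 (u + 1) 1).map (fun i => curr + 2 * i) =
            (PySem.List.pyRange 0 u 1).map (fun i => curr + 2 * (1 + i)) := by
          have h := map_pyRange_shift u 1 (fun i => curr + 2 * i)
          rw [show (1 : Int) + u = u + 1 by ring] at h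
          exact h
        have hfun : (PySem.List.pyRange 0 u 1).map (fun i => curr + 2 * (1 + i)) =
            (PySem.List.pyRange 0 u 1).map (fun i => curr + 2 + 2 * i) := by
          apply List.map_congr_left; intro k _; ring
        refine Prod.ext ?_ ?_
        · simp only [hcons, List.map_cons, hsh, hfun]
          simp
        · have h : (u + 1) * curr + (u + 1) * (u + 1 - 1) =
              u * (curr + 2) + u * (u - 1) + curr := by ring
          simp only []
          omega
      · have h : (u + 1 - 1) * curr + (u + 1 - 1) * (u + 1 - 2) =
            (u - 1) * (curr + 2) + (u - 1) * (u - 2) + curr := by ring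
        omega
      · have h : (u + 1) * curr + (u + 1) * (u + 1 - 1) =
            u * (curr + 2) + u * (u - 1) + curr := by ring
        omega

lemma bsearch_spec (S : Int) (n : Nat) (lo hi : Int)
    (hn : (hi - lo).toNat ≤ n) (hlh : lo ≤ hi)
    (hlo : lo * (lo + 1) ≤ S) (hhi : S < (hi + 1) * (hi + 2)) :
    lo ≤ bsearchK S lo hi ∧ bsearchK S lo hi * (bsearchK S lo hi + 1) ≤ S ∧
      S < (bsearchK S lo hi + 1) * (bsearchK S lo hi + 2) := by
  induction n generalizing lo hi with
  | zero =>
    have hle : lo = hi := by omega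
    subst hle
    rw [bsearchK, dif_neg (lt_irrefl lo)]
    exact ⟨le_refl _, hlo, hhi⟩
  | succ n ih =>
    by_cases h : lo < hi
    · rw [bsearchK, dif_pos h]
      have hb := PySem.Int.floordiv_two_mid_bounds (lo := lo + 1) (hi := hi) (by omega)
      rw [show lo + 1 + hi = lo + hi + 1 by ring] at hb
      simp only []
      by_cases hcmp : PySem.Int.floordiv (lo + hi + 1) 2 * (PySem.Int.floordiv (lo + hi + 1) 2 + 1) ≤ S
      · rw [if_pos hcmp]
        have h2 := ih (PySem.Int.floordiv (lo + hi + 1) 2) hi (by omega) (by omega) hcmp hhi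
        exact ⟨by omega, h2.2.1, h2.2.2⟩
      · rw [if_neg hcmp]
        have heq : (PySem.Int.floordiv (lo + hi + 1) 2 - 1 + 1) *
            (PySem.Int.floordiv (lo + hi + 1) 2 - 1 + 2) =
            PySem.Int.floordiv (lo + hi + 1) 2 * (PySem.Int.floordiv (lo + hi + 1) 2 + 1) := by
          ring
        exact ih lo (PySem.Int.floordiv (lo + hi + 1) 2 - 1) (by omega) (by omega) hlo
          (by rw [heq]; omega)
    · rw [bsearchK, dif_neg h]
      have hle : lo = hi := by omega
      subst hle
      exact ⟨le_refl _, hlo, hhi⟩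

lemma k_unique (S k1 k2 : Int) (ha1 : 1 ≤ k1) (ha2 : 1 ≤ k2)
    (h1 : k1 * (k1 + 1) ≤ S) (h2 : S < (k1 + 1) * (k1 + 2))
    (h3 : k2 * (k2 + 1) ≤ S) (h4 : S < (k2 + 1) * (k2 + 2)) : k1 = k2 := by
  rcases lt_trichotomy k1 k2 with h | h | h
  · exfalso; nlinarith
  · exact h
  · exfalso; nlinarith

-- reindexing: [2+2i for i in range(0,t)] = [2*i for i in range(1,t+1)]
lemma reindex (t : Int) :
    (PySem.List.pyRange 0 t 1).map (fun i => 2 + 2 * i) =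
      (PySem.List.pyRange 1 (t + 1) 1).map (fun i => 2 * i) := by
  have h := map_pyRange_shift t 1 (fun i => 2 * i)
  rw [show (1 : Int) + t = t + 1 by ring] at h
  rw [h]
  apply List.map_congr_left; intro k _; ring

-- ===== VERDICT (by name: the statement is the Claim_ definition above) =====
theorem maximumEvenSplit2_spec : Claim_equal_maximumEvenSplit2 := by
  intro fs _hdom hpre
  show maximumEvenSplit2 fs = maximumEvenSplit2_alt fs
  have hm2 : PySem.Int.mod fs 2 = fs % 2 := PySem.Int.mod_eq_emod_of_pos (by norm_num)
  by_cases hodd : PySem.Int.mod fs 2 = 1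
  · rw [maximumEvenSplit2, if_pos hodd, maximumEvenSplit2_alt, if_pos (Or.inl hodd)]
  · have hodd2 : ¬ fs % 2 = 1 := by rw [← hm2]; exact hodd
    have heven : fs % 2 = 0 := by omega
    have hnn : 0 ≤ fs := by
      rcases hpre with h | h
      · exact absurd h hodd
      · exact h
    by_cases hz : fs = 0
    · subst hz
      rw [maximumEvenSplit2, if_neg hodd, maximumEvenSplit2_alt, if_pos (Or.inr (le_refl 0))]
      rw [loopA, dif_neg (by norm_num)]
      norm_num
    · have hpos : 0 < fs := by omega
      have hfs2 : 2 ≤ fs := by omega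
      obtain ⟨t, ht1, heq, hlow, hup⟩ := loopA_char fs.toNat fs 2 [] (le_refl _) (le_refl _) hpos
      obtain ⟨c, hc⟩ := Int.even_mul_succ_self t
      have hcsum : t * 2 + t * (t - 1) = c + c := by rw [← hc]; ring
      have hlow2 : (t - 1) * t < fs := by
        have h : (t - 1) * 2 + (t - 1) * (t - 2) = (t - 1) * t := by ring
        linarith [hlow]
      obtain ⟨hk1, hkl, hku⟩ := bsearch_spec fs (fs - 1).toNat 1 fs (le_refl _) (by omega)
        (by norm_num; omega) (by nlinarith [sq_nonneg fs])
      have hBneg : ¬ (PySem.Int.mod fs 2 = 1 ∨ fs ≤ 0) :=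
        fun h => h.elim hodd (fun h2 => absurd h2 (by omega))
      rw [maximumEvenSplit2, if_neg hodd, maximumEvenSplit2_alt, if_neg hBneg]
      simp only [heq, List.nil_append]
      by_cases hr : fs - (t * 2 + t * (t - 1)) < 0
      · -- loop overshot: patch last element, then merge the last two
        have ht2 : 2 ≤ t := by
          by_contra hlt
          have ht1e : t = 1 := by omega
          rw [ht1e] at hr
          norm_num at hr
          omega
        have hr' : fs - (c + c) < 0 := by linarith [hr, hcsum]
        have hr2 : fs - (c + c) ≤ -2 := by omega
        have hrle : fs - (t * 2 + t * (t - 1)) ≤ -2 := by linarith [hcsum]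
        have hk : bsearchK fs 1 fs = t - 1 := by
          refine k_unique fs (bsearchK fs 1 fs) (t - 1) hk1 (by omega) hkl hku ?_ ?_
          · have h1 : (t - 1) * (t - 1 + 1) = (t - 1) * t := by ring
            rw [h1]; linarith [hlow2]
          · have h2 : (t - 1 + 1) * (t - 1 + 2) = t * 2 + t * (t - 1) := by ring
            rw [h2]; linarith [hr]
        have hs1 : PySem.List.pyRange 0 t 1 = PySem.List.pyRange 0 (t - 1) 1 ++ [t - 1] := by
          have h := PySem.List.pyRange_one_succ_right (a := 0) (b := t - 1) (by omega)
          rw [show t - 1 + 1 = t by ring] at h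
          exact h
        have hs2 : PySem.List.pyRange 0 (t - 1) 1 = PySem.List.pyRange 0 (t - 2) 1 ++ [t - 2] := by
          have h := PySem.List.pyRange_one_succ_right (a := 0) (b := t - 2) (by omega)
          rw [show t - 2 + 1 = t - 1 by ring] at h
          exact h
        rw [if_pos hr]
        rw [hs1, List.map_append, hs2, List.map_append]
        simp only [List.map_cons, List.map_nil]
        simp only [List.dropLast_concat, getLast!_concat_int]
        split_ifs with hcnd
        · rw [hk]
          have hre := reindex (t - 2)
          rw [show t - 2 + 1 = t - 1 by ring] at hre
          rw [← hre]
          congr 1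
          simp only [List.cons.injEq, and_true]
          ring
        · exfalso
          apply hcnd
          constructor
          · simp only [List.length_append, List.length_cons, List.length_nil]
            omega
          · linarith [hrle]
      · -- exact fit: fs = t*(t+1), no patch, no merge
        have hfit : fs = t * 2 + t * (t - 1) := by
          have hge : t * 2 + t * (t - 1) ≤ fs := by
            by_contra hlt
            exact hr (by linarith)
          linarith [hup, hge]
        have hk : bsearchK fs 1 fs = t := by
          refine k_unique fs (bsearchK fs 1 fs) t hk1 ht1 hkl hku ?_ ?_
          · have h1 : t * (t + 1) = t * 2 + t * (t - 1) := by ring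
            rw [h1]; linarith [hfit]
          · have h2 : (t + 1) * (t + 2) = t * 2 + t * (t - 1) + 2 * t + 2 := by ring
            rw [h2]; linarith [hfit, ht1]
        have hout : (PySem.List.pyRange 0 t 1).map (fun i => (2 : Int) + 2 * i) =
            (PySem.List.pyRange 1 (bsearchK fs 1 fs) 1).map (fun i => 2 * i) ++
              [2 * bsearchK fs 1 fs + fs - bsearchK fs 1 fs * (bsearchK fs 1 fs + 1)] := by
          rw [hk]
          have hre := reindex t
          have hsp : PySem.List.pyRange 1 (t + 1) 1 = PySem.List.pyRange 1 t 1 ++ [t] :=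
            PySem.List.pyRange_one_succ_right (a := 1) (b := t) (by omega)
          rw [hre, hsp, List.map_append]
          simp only [List.map_cons, List.map_nil]
          congr 2
          have h3 : t * (t + 1) = t * 2 + t * (t - 1) := by ring
          linarith [hfit, h3]
        rw [if_neg hr]
        split_ifs with hcnd
        · exfalso
          by_cases ht2 : 2 ≤ t
          · have hs1 : PySem.List.pyRange 0 t 1 = PySem.List.pyRange 0 (t - 1) 1 ++ [t - 1] := by
              have h := PySem.List.pyRange_one_succ_right (a := 0) (b := t - 1) (by omega)
              rw [show t - 1 + 1 = t by ring] at h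
              exact h
            have hs2 : PySem.List.pyRange 0 (t - 1) 1 = PySem.List.pyRange 0 (t - 2) 1 ++ [t - 2] := by
              have h := PySem.List.pyRange_one_succ_right (a := 0) (b := t - 2) (by omega)
              rw [show t - 2 + 1 = t - 1 by ring] at h
              exact h
            rw [hs1, List.map_append, hs2, List.map_append] at hcnd
            simp only [List.map_cons, List.map_nil] at hcnd
            obtain ⟨-, hle⟩ := hcnd
            rw [getLast!_concat_int, List.dropLast_concat, getLast!_concat_int] at hle
            linarith [hle]
          · have ht1e : t = 1 := by omega
            subst ht1e
            have hone : PySem.List.pyRange 0 1 1 = [0] := by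
              rw [PySem.List.pyRange_one]; norm_num
            rw [hone] at hcnd
            simp at hcnd
        · exact hout
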